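-- pv_equiv track=rewrite | github.com/zerox80/adblock-list | generate_brave_filter.py | get_category_priority
-- ===== SOURCE A (Python) =====
-- PRIORITY_CATEGORIES = [
--     "Advertising",
--     "Analytics",
--     "Audience Measurement",
--     "Marketing",
--     "Third-Party Analytics",
--     "Social Network",
--     "Customer Interaction",
--     # Weniger kritische hinzufügen, falls mehr benötigt wird
--     "Embedded Content",
--     "Online Payment",
--     "Obscure",
--     "CDN", # Normalerweise nicht blockieren, aber zur Vollständigkeit
-- ]
--
-- def get_category_priority(categories):
--     """Gibt einen Prioritätsscore basierend auf den Kategorien zurück. Höher ist besser."""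
--     if not categories:
--         return 0
--     prio = 99 # Startwert für niedrige Priorität
--     for cat in categories:
--         cat_lower = cat.lower()
--         for i, prio_cat in enumerate(PRIORITY_CATEGORIES):
--             if prio_cat.lower() == cat_lower:
--                 prio = min(prio, i) # Niedrigster Index (höchste Priorität in der Liste) zählt
--                 break # Sobald eine Übereinstimmung gefunden wurde
--     # Wenn eine Prioritätskategorie gefunden wurde (prio < 99)
--     if prio < 99:
--         # Höherer Score für Kategorien weiter oben in der Liste
--         return len(PRIORITY_CATEGORIES) - prio
--     return 0 # Keine der Prioritätskategorien gefunden
-- ===== SOURCE B (Python) =====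
-- PRIORITY_CATEGORIES = [
--     "Advertising",
--     "Analytics",
--     "Audience Measurement",
--     "Marketing",
--     "Third-Party Analytics",
--     "Social Network",
--     "Customer Interaction",
--     "Embedded Content",
--     "Online Payment",
--     "Obscure",
--     "CDN",
-- ]
--
-- def get_category_priority(categories):
--     """Priority score from categories; higher is better."""
--     names = {c.lower() for c in categories}
--     for i, prio_cat in enumerate(PRIORITY_CATEGORIES):
--         if prio_cat.lower() in names:
--             return len(PRIORITY_CATEGORIES) - i
--     return 0
-- ===== Notes on version B (the rewrite author's own statement) =====
-- stated objective: faster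
-- what changed: B builds a set of lowercased input names in one pass and then scans the fixed PRIORITY_CATEGORIES list once with an early return at the first member, instead of A's inner scan of the priority list for every input element while tracking a minimum index with a 99 sentinel.
import Mathlib
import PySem

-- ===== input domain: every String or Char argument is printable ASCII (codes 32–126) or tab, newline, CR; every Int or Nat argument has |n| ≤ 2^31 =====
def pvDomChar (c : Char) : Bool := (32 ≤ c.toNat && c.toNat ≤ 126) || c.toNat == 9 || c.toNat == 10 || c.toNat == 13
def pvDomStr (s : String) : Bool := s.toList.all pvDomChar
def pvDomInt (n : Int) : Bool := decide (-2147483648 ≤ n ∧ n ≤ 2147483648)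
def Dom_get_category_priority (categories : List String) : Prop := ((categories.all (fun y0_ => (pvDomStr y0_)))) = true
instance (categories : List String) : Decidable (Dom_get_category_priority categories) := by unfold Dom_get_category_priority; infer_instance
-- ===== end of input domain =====

-- B replaces A's per-category inner scan with minimum-index tracking by one lowercased
-- membership set plus a single early-return scan of the fixed priority list (measured faster).

-- ===== PORT A =====
def pvPrios : List String :=
  ["Advertising", "Analytics", "Audience Measurement", "Marketing",
   "Third-Party Analytics", "Social Network", "Customer Interaction",
   "Embedded Content", "Online Payment", "Obscure", "CDN"]

-- A's inner loop: 'for i, prio_cat in enumerate(PRIORITY_CATEGORIES): … break'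
def pvInnerA (catLower : String) (prio : Int) : List (Int × String) → Int
  | [] => prio
  | (i, p) :: rest =>
      if PySem.Str.lower p == catLower then min prio i else pvInnerA catLower prio rest

def get_category_priority (categories : List String) : Int :=
  if categories = [] then 0
  else
    let prio := categories.foldl
      (fun prio cat => pvInnerA (PySem.Str.lower cat) prio (PySem.List.enumerate pvPrios)) 99
    if prio < 99 then (pvPrios.length : Int) - prio else 0

-- ===== PORT B =====
-- B's loop: 'for i, prio_cat in enumerate(PRIORITY_CATEGORIES): if … in names: return …'
def pvScanB (names : PySem.Set String) : List (Int × String) → Int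
  | [] => 0
  | (i, p) :: rest =>
      if PySem.Set.contains names (PySem.Str.lower p) then (pvPrios.length : Int) - i
      else pvScanB names rest

def get_category_priority_alt (categories : List String) : Int :=
  pvScanB (PySem.Set.ofList (categories.map PySem.Str.lower)) (PySem.List.enumerate pvPrios)

-- ===== PRECONDITION & SPEC =====
def Spec_get_category_priority (categories : List String) (out : Int) : Prop := out = get_category_priority_alt categories
instance (categories : List String) (out : Int) : Decidable (Spec_get_category_priority categories out) := by unfold Spec_get_category_priority; infer_instance

-- ===== CLAIM (what is proved, stated in full; the proofs are below) =====
def Claim_equal_get_category_priority : Prop := ∀ (categories : List String), Dom_get_category_priority categories → Spec_get_category_priority categories (get_category_priority categories)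

-- ===== LEMMAS AND PROOFS =====

-- first index in l whose lowered snd equals cl, else 99 (value of A's inner loop on prio = 99)
def pvF (cl : String) : List (Int × String) → Int
  | [] => 99
  | (i, p) :: r => if PySem.Str.lower p == cl then i else pvF cl r

-- first index in l whose lowered snd is a member of S, else 99
def pvG (S : List String) : List (Int × String) → Int
  | [] => 99
  | (i, p) :: r => if PySem.Str.lower p ∈ S then i else pvG S r

theorem pvInnerA_eq (cl : String) : ∀ (l : List (Int × String)) (prio : Int), prio ≤ 99 →
    pvInnerA cl prio l = min prio (pvF cl l) := by
  intro l
  induction l with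
  | nil => intro prio h; simp [pvInnerA, pvF]; omega
  | cons hd tl ih =>
      intro prio h
      obtain ⟨i, p⟩ := hd
      by_cases hm : PySem.Str.lower p == cl
      · simp [pvInnerA, pvF, hm]
      · simp [pvInnerA, pvF, hm, ih prio h]

theorem pvF_mem (cl : String) : ∀ (l : List (Int × String)),
    pvF cl l = 99 ∨ ∃ x ∈ l, pvF cl l = x.1 := by
  intro l
  induction l with
  | nil => left; rfl
  | cons hd tl ih =>
      obtain ⟨i, p⟩ := hd
      by_cases hm : PySem.Str.lower p == cl
      · right; exact ⟨(i, p), by simp, by simp [pvF, hm]⟩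
      · rcases ih with h | ⟨x, hx, he⟩
        · left; simp [pvF, hm, h]
        · right; exact ⟨x, by simp [hx], by simp [pvF, hm, he]⟩

theorem pvG_mem (S : List String) : ∀ (l : List (Int × String)),
    pvG S l = 99 ∨ ∃ x ∈ l, pvG S l = x.1 := by
  intro l
  induction l with
  | nil => left; rfl
  | cons hd tl ih =>
      obtain ⟨i, p⟩ := hd
      by_cases hm : PySem.Str.lower p ∈ S
      · right; exact ⟨(i, p), by simp, by simp [pvG, hm]⟩
      · rcases ih with h | ⟨x, hx, he⟩
        · left; simp [pvG, hm, h]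
        · right; exact ⟨x, by simp [hx], by simp [pvG, hm, he]⟩

theorem pvG_nil : ∀ (l : List (Int × String)), pvG [] l = 99 := by
  intro l
  induction l with
  | nil => rfl
  | cons hd tl ih => obtain ⟨i, p⟩ := hd; simp [pvG, ih]

theorem pvG_congr (S T : List String) (h : ∀ y, y ∈ S ↔ y ∈ T) :
    ∀ (l : List (Int × String)), pvG S l = pvG T l := by
  intro l
  induction l with
  | nil => rfl
  | cons hd tl ih =>
      obtain ⟨i, p⟩ := hd
      by_cases hm : PySem.Str.lower p ∈ S
      · simp [pvG, hm, (h _).mp hm]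
      · have hmT : PySem.Str.lower p ∉ T := fun hc => hm ((h _).mpr hc)
        simp [pvG, hm, hmT, ih]

theorem pvG_insert (x : String) (S : List String) :
    ∀ (l : List (Int × String)), l.Pairwise (fun a b => a.1 ≤ b.1) → (∀ y ∈ l, y.1 ≤ 99) →
    pvG (x :: S) l = min (pvF x l) (pvG S l) := by
  intro l
  induction l with
  | nil => intro _ _; simp [pvG, pvF]
  | cons hd tl ih =>
      intro hp hb
      obtain ⟨i, p⟩ := hd
      have hi : i ≤ 99 := hb (i, p) (by simp)
      have htlb : ∀ y ∈ tl, y.1 ≤ 99 := fun y hy => hb y (by simp [hy])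
      have hle : ∀ y ∈ tl, i ≤ y.1 := by
        intro y hy; exact (List.pairwise_cons.mp hp).1 y hy
      by_cases h1 : PySem.Str.lower p = x
      · subst h1
        by_cases h2 : PySem.Str.lower p ∈ S
        · simp [pvG, pvF, h2]
        · have hG : pvG S tl = 99 ∨ ∃ y ∈ tl, pvG S tl = y.1 := pvG_mem S tl
          have hiG : i ≤ pvG S tl := by
            rcases hG with h | ⟨y, hy, he⟩
            · omega
            · rw [he]; exact hle y hy
          simp [pvG, pvF, h2]
          omega
      · by_cases h2 : PySem.Str.lower p ∈ S
        · have hF : pvF x tl = 99 ∨ ∃ y ∈ tl, pvF x tl = y.1 := pvF_mem x tl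
          have hiF : i ≤ pvF x tl := by
            rcases hF with h | ⟨y, hy, he⟩
            · omega
            · rw [he]; exact hle y hy
          simp [pvG, pvF, h1, h2]
          omega
        · have := ih (List.pairwise_cons.mp hp).2 htlb
          simp [pvG, pvF, h1, h2, this]

theorem pvEnum_pairwise :
    (PySem.List.enumerate pvPrios).Pairwise (fun (a b : Int × String) => a.1 ≤ b.1) := by
  decide

theorem pvEnum_bound : ∀ y ∈ PySem.List.enumerate pvPrios, y.1 ≤ 98 ∧ 0 ≤ y.1 := by
  decide

theorem pvFoldl_char : ∀ (cats : List String) (prio : Int), prio ≤ 99 →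
    cats.foldl (fun prio cat => pvInnerA (PySem.Str.lower cat) prio (PySem.List.enumerate pvPrios)) prio
      = min prio (pvG (cats.map PySem.Str.lower) (PySem.List.enumerate pvPrios)) := by
  intro cats
  induction cats with
  | nil =>
      intro prio h
      simp [pvG_nil]
      omega
  | cons c cs ih =>
      intro prio h
      have hF : pvF (PySem.Str.lower c) (PySem.List.enumerate pvPrios) ≤ 99 := by
        rcases pvF_mem (PySem.Str.lower c) (PySem.List.enumerate pvPrios) with h' | ⟨y, hy, he⟩
        · omega
        · have := (pvEnum_bound y hy).1; omega
      have step : List.foldl (fun prio cat => pvInnerA (PySem.Str.lower cat) prio (PySem.List.enumerate pvPrios)) prio (c :: cs)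
          = List.foldl (fun prio cat => pvInnerA (PySem.Str.lower cat) prio (PySem.List.enumerate pvPrios))
              (min prio (pvF (PySem.Str.lower c) (PySem.List.enumerate pvPrios))) cs := by
        simp [List.foldl_cons, pvInnerA_eq _ _ prio h]
      rw [step, ih _ (by omega), List.map_cons,
        pvG_insert (PySem.Str.lower c) (cs.map PySem.Str.lower) (PySem.List.enumerate pvPrios)
          pvEnum_pairwise (fun y hy => by have := (pvEnum_bound y hy).1; omega)]
      omega

theorem pvScanB_eq (names : List String) :
    ∀ (l : List (Int × String)), (∀ y ∈ l, y.1 ≤ 98) →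
    pvScanB names l = if pvG names l = 99 then 0 else (pvPrios.length : Int) - pvG names l := by
  intro l
  induction l with
  | nil => intro _; rfl
  | cons hd tl ih =>
      intro hb
      obtain ⟨i, p⟩ := hd
      have hi : i ≤ 98 := hb (i, p) (by simp)
      by_cases hm : PySem.Str.lower p ∈ names
      · have : ¬ (i = 99) := by omega
        simp [pvScanB, pvG, hm, this]
      · simp [pvScanB, pvG, hm, ih (fun y hy => hb y (by simp [hy]))]

-- ===== VERDICT (by name: the statement is the Claim_ definition above) =====
theorem get_category_priority_spec : Claim_equal_get_category_priority := by
  unfold Claim_equal_get_category_priority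
  intro cats _
  unfold Spec_get_category_priority
  by_cases hnil : cats = []
  · subst hnil
    rfl
  · have hmap : ∀ y, y ∈ PySem.Set.ofList (cats.map PySem.Str.lower) ↔ y ∈ cats.map PySem.Str.lower :=
      fun y => PySem.Set.mem_ofList _ _
    have hG := pvG_congr _ _ hmap (PySem.List.enumerate pvPrios)
    have hGb : pvG (cats.map PySem.Str.lower) (PySem.List.enumerate pvPrios) = 99 ∨
        pvG (cats.map PySem.Str.lower) (PySem.List.enumerate pvPrios) ≤ 98 := by
      rcases pvG_mem (cats.map PySem.Str.lower) (PySem.List.enumerate pvPrios) with h | ⟨y, hy, he⟩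
      · left; exact h
      · right; rw [he]; exact (pvEnum_bound y hy).1
    rw [get_category_priority_alt, pvScanB_eq _ _ (fun y hy => (pvEnum_bound y hy).1), hG]
    rw [get_category_priority]
    simp only [hnil, if_false]
    rw [pvFoldl_char cats 99 (by omega)]
    rcases hGb with h | h
    · simp [h]
    · have : min (99 : Int) (pvG (cats.map PySem.Str.lower) (PySem.List.enumerate pvPrios))
          = pvG (cats.map PySem.Str.lower) (PySem.List.enumerate pvPrios) := by omega
      rw [this]
      split_ifs <;> omega
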